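-- pv_equiv track=rewrite | github.com/byronyeh22/flask | python-flask/user_platform/app/vsphere/vm/db/insert_vm_configuration_to_db.py | _next_free_scsi_slot
-- ===== SOURCE A (Python) =====
-- _SCSI_CONTROLLERS = range(0, 4)
--
-- _VALID_UNITS = [0,1,2,3,4,5,6,8,9,10,11,12,13,14,15]
--
-- _SYSTEM_SLOT = (0, 0)
--
-- def _next_free_scsi_slot(used):
--     """
--     取得下一個可用 (controller, unit)：
--     - controller 從 0..3
--     - unit 從 _VALID_UNITS 順序掃描，跳過 (0,0)
--     - 可回傳 (1:0)/(2:0)/(3:0)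
--     """
--     used = set((int(c), int(u)) for (c, u) in used if c is not None and u is not None)
--     for c in _SCSI_CONTROLLERS:
--         for u in _VALID_UNITS:
--             if (c, u) == _SYSTEM_SLOT:
--                 continue
--             if (c, u) not in used:
--                 return (c, u)
--     raise Exception("No free SCSI slot available (controllers 0..3 exhausted)")
-- ===== SOURCE B (Python) =====
-- _SCSI_CONTROLLERS = range(0, 4)
--
-- _VALID_UNITS = [0,1,2,3,4,5,6,8,9,10,11,12,13,14,15]
--
-- _SYSTEM_SLOT = (0, 0)
--
-- def _next_free_scsi_slot(used):
--     # Set-difference formulation: build the whole candidate grid once,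
--     # subtract the used slots, and return the lexicographic minimum.
--     all_slots = frozenset((c, u) for c in _SCSI_CONTROLLERS for u in _VALID_UNITS) - {_SYSTEM_SLOT}
--     used_set = set((int(c), int(u)) for (c, u) in used if c is not None and u is not None)
--     free = all_slots - used_set
--     if not free:
--         raise Exception("No free SCSI slot available (controllers 0..3 exhausted)")
--     return min(free)
-- ===== Notes on version B (the rewrite author's own statement) =====
-- stated objective: alternative
-- what changed: Replaced the early-returning nested controller/unit scan with a set-difference of the full candidate grid against the used set followed by min over the free set (first-hit order equals lexicographic minimum).
import Mathlib
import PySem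

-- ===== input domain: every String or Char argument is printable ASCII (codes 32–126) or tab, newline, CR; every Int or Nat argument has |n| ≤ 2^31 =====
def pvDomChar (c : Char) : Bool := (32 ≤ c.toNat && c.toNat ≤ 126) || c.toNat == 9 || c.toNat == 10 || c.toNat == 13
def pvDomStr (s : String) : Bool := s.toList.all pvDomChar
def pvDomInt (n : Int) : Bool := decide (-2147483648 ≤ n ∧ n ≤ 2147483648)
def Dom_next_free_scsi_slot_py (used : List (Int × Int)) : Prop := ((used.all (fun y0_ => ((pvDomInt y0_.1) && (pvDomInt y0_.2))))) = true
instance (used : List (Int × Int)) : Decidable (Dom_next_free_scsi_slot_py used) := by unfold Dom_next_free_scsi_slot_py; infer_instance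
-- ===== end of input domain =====

-- B replaces A's early-returning nested (controller, unit) scan by a set-difference of the
-- full candidate grid against the used set followed by min over the free set (objective: alternative).

-- _VALID_UNITS
def pvValidUnits : List Int := [0, 1, 2, 3, 4, 5, 6, 8, 9, 10, 11, 12, 13, 14, 15]

-- ===== PORT A =====
def next_free_scsi_slot_py (used : List (Int × Int)) : Int × Int :=
  -- used = set((int(c), int(u)) for (c, u) in used if c is not None and u is not None)
  -- (int() on an int is the identity; the None-filter never fires on typed (Int × Int) input)
  let usedS : PySem.Set (Int × Int) := PySem.Set.ofList used
  -- nested 'for' loops with early return, ported as nested findSome?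
  match (PySem.List.pyRange 0 4 1).findSome? (fun c =>
      pvValidUnits.findSome? (fun u =>
        if (c, u) = ((0 : Int), (0 : Int)) then none            -- continue (skip _SYSTEM_SLOT)
        else if PySem.Set.contains usedS (c, u) then none
        else some (c, u))) with
  | some s => s
  | none => ((0 : Int), (0 : Int))   -- Python raises here; excluded by Pre_

-- Python tuple '<' on (int, int) is lexicographic
def pvLexLt (a b : Int × Int) : Bool := a.1 < b.1 || (a.1 == b.1 && a.2 < b.2)

-- ===== PORT B =====
def next_free_scsi_slot_py_alt (used : List (Int × Int)) : Int × Int :=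
  -- all_slots = frozenset((c, u) for c in range(4) for u in _VALID_UNITS) - {(0, 0)}
  let allSlots : PySem.Set (Int × Int) :=
    PySem.Set.diff
      (PySem.Set.ofList ((PySem.List.pyRange 0 4 1).flatMap (fun c => pvValidUnits.map (fun u => (c, u)))))
      [((0 : Int), (0 : Int))]
  let usedS : PySem.Set (Int × Int) := PySem.Set.ofList used
  let free : PySem.Set (Int × Int) := PySem.Set.diff allSlots usedS
  -- min(free): lexicographic minimum, order-independent, ported as a running-min fold
  match free with
  | [] => ((0 : Int), (0 : Int))     -- Python raises here; excluded by Pre_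
  | h :: t => t.foldl (fun m s => if pvLexLt s m then s else m) h

-- ===== PRECONDITION & SPEC =====
-- the candidate grid, in scan order (used by Pre_ and by the proofs)
def pvCands : List (Int × Int) :=
  (((PySem.List.pyRange 0 4 1).flatMap (fun c => pvValidUnits.map (fun u => (c, u)))).filter
    (fun s => !(s == ((0 : Int), (0 : Int)))))

-- Pre_ excludes exactly the inputs on which the Python A raises: those covering every candidate slot.
def Pre_next_free_scsi_slot_py (used : List (Int × Int)) : Prop := ∃ s ∈ pvCands, s ∉ used
instance (used : List (Int × Int)) : Decidable (Pre_next_free_scsi_slot_py used) := by unfold Pre_next_free_scsi_slot_py; infer_instance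

def pvWitness_next_free_scsi_slot_py : (List (Int × Int)) := ([((0 : Int), (1 : Int))])

def Spec_next_free_scsi_slot_py (used : List (Int × Int)) (out : Int × Int) : Prop := out = next_free_scsi_slot_py_alt used
instance (used : List (Int × Int)) (out : Int × Int) : Decidable (Spec_next_free_scsi_slot_py used out) := by unfold Spec_next_free_scsi_slot_py; infer_instance

-- ===== CLAIM (what is proved, stated in full; the proofs are below) =====
def Claim_equal_next_free_scsi_slot_py : Prop := ∀ (used : List (Int × Int)), Dom_next_free_scsi_slot_py used → Pre_next_free_scsi_slot_py used → Spec_next_free_scsi_slot_py used (next_free_scsi_slot_py used)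

-- ===== LEMMAS AND PROOFS =====

-- A's inner unit loop over one controller is find? over the filtered row of the grid
theorem pv_inner_eq (l : List Int) (c : Int) (q : Int × Int → Bool) :
    l.findSome? (fun u =>
        if (c, u) = ((0 : Int), (0 : Int)) then none
        else if q (c, u) then none
        else some (c, u))
    = ((l.map (fun u => (c, u))).filter (fun s => !(s == ((0 : Int), (0 : Int))))).find?
        (fun s => !(q s)) := by
  induction l with
  | nil => simp
  | cons u t ih =>
    simp only [List.map_cons, List.filter_cons, List.findSome?_cons]
    by_cases h0 : (c, u) = ((0 : Int), (0 : Int))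
    · have hb : ((c, u) == ((0 : Int), (0 : Int))) = true := beq_iff_eq.mpr h0
      rw [if_pos h0]
      simp only [hb, Bool.not_true, Bool.false_eq_true, if_false]
      exact ih
    · have hb : ((c, u) == ((0 : Int), (0 : Int))) = false := beq_eq_false_iff_ne.mpr h0
      rw [if_neg h0]
      simp only [hb, Bool.not_false, if_true, List.find?_cons]
      by_cases hq : q (c, u)
      · rw [if_pos hq]
        simp only [hq, Bool.not_true]
        exact ih
      · rw [if_neg hq]
        have hq' : q (c, u) = false := by simpa using hq
        simp only [hq', Bool.not_false]

-- port A computes the first free candidate (in grid order)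
theorem pv_A_eq_find (used : List (Int × Int)) :
    next_free_scsi_slot_py used
      = (pvCands.find? (fun s => !(PySem.Set.contains (PySem.Set.ofList used) s))).getD
          ((0 : Int), (0 : Int)) := by
  have hr : PySem.List.pyRange 0 4 1 = [0, 1, 2, 3] := by decide
  unfold next_free_scsi_slot_py pvCands
  rw [hr]
  simp only [List.findSome?_cons, List.findSome?_nil, pv_inner_eq,
    List.flatMap_cons, List.flatMap_nil, List.append_nil, List.filter_append,
    List.find?_append]
  cases ((pvValidUnits.map (fun u => ((0 : Int), u))).filter
      (fun s => !(s == ((0 : Int), (0 : Int))))).find?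
      (fun s => !(PySem.Set.contains (PySem.Set.ofList used) s)) <;>
    cases ((pvValidUnits.map (fun u => ((1 : Int), u))).filter
        (fun s => !(s == ((0 : Int), (0 : Int))))).find?
        (fun s => !(PySem.Set.contains (PySem.Set.ofList used) s)) <;>
      cases ((pvValidUnits.map (fun u => ((2 : Int), u))).filter
          (fun s => !(s == ((0 : Int), (0 : Int))))).find?
          (fun s => !(PySem.Set.contains (PySem.Set.ofList used) s)) <;>
        cases ((pvValidUnits.map (fun u => ((3 : Int), u))).filter
            (fun s => !(s == ((0 : Int), (0 : Int))))).find?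
            (fun s => !(PySem.Set.contains (PySem.Set.ofList used) s)) <;>
          simp [Option.or]

theorem pvLexLt_asymm (a b : Int × Int) (h : pvLexLt a b = true) : pvLexLt b a = false := by
  rcases a with ⟨a1, a2⟩; rcases b with ⟨b1, b2⟩
  simp [pvLexLt] at h ⊢
  omega

theorem pv_foldl_min_stay (t : List (Int × Int)) (m : Int × Int)
    (h : ∀ x ∈ t, pvLexLt x m = false) :
    t.foldl (fun m s => if pvLexLt s m then s else m) m = m := by
  induction t with
  | nil => rfl
  | cons x s ih =>
    have hx : pvLexLt x m = false := h x (by simp)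
    simp only [List.foldl_cons, hx, if_false, Bool.false_eq_true]
    exact ih (fun y hy => h y (by simp [hy]))

-- on a lex-sorted list, the running min of the filtered list is the first match
theorem pv_minfold_eq_find (l : List (Int × Int)) (p : Int × Int → Bool)
    (h : l.Pairwise (fun a b => pvLexLt a b = true)) :
    (match l.filter p with
     | [] => ((0 : Int), (0 : Int))
     | h :: t => t.foldl (fun m s => if pvLexLt s m then s else m) h)
    = (l.find? p).getD ((0 : Int), (0 : Int)) := by
  induction l with
  | nil => simp
  | cons a t ih =>
    rcases List.pairwise_cons.mp h with ⟨ha, ht⟩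
    by_cases hp : p a
    · simp only [List.filter_cons, hp, if_true, List.find?_cons, Option.getD_some]
      exact pv_foldl_min_stay _ a
        (fun x hx => pvLexLt_asymm a x (ha x (List.mem_of_mem_filter hx)))
    · simp only [List.filter_cons, hp, if_false, List.find?_cons, Bool.false_eq_true]
      exact ih ht

set_option maxRecDepth 20000 in
theorem pv_cands_sorted : pvCands.Pairwise (fun a b => pvLexLt a b = true) := by decide

-- port B computes the running lex-min of the free candidates
set_option maxRecDepth 20000 in
theorem pv_B_eq_minfold (used : List (Int × Int)) :
    next_free_scsi_slot_py_alt used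
      = (match pvCands.filter (fun s => !(PySem.Set.contains (PySem.Set.ofList used) s)) with
         | [] => ((0 : Int), (0 : Int))
         | h :: t => t.foldl (fun m s => if pvLexLt s m then s else m) h) := by
  have hall :
      PySem.Set.diff
        (PySem.Set.ofList ((PySem.List.pyRange 0 4 1).flatMap (fun c => pvValidUnits.map (fun u => (c, u)))))
        [((0 : Int), (0 : Int))] = pvCands := by decide
  unfold next_free_scsi_slot_py_alt
  rw [hall]
  rfl

-- ===== VERDICT (by name: the statement is the Claim_ definition above) =====
theorem next_free_scsi_slot_py_spec : Claim_equal_next_free_scsi_slot_py := by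
  intro used _ _
  unfold Spec_next_free_scsi_slot_py
  rw [pv_A_eq_find, pv_B_eq_minfold,
    pv_minfold_eq_find _ _ pv_cands_sorted]
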